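-- pv_equiv track=rewrite | github.com/fasiha/ebisu | binomialExpansion.py | expandLog
-- ===== SOURCE A (Python) =====
-- from itertools import combinations
-- from typing import Any
--
-- def expandLog(lst: list[Any]):
--   """
--   Expand a product of binomials in terms of their log
--
--   If the input is taken to mean
--   ```
--   prod(1 - exp(x) for x in lst)
--   ```
--   then the following operation on the returned list will
--   equal this to floating precision:
--   ```
--   coefs, signs = expandLog(lst)
--   sum(sign * exp(x) for x, sign in zip(coefs, signs))
--   ```
--   """
--   n = len(lst)
--   coefficients = [0]
--   signs = [1]
--
--   sign = 1
--   for k in range(1, n + 1):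
--     sign *= -1
--     for combo in combinations(lst, k):
--       coefficients.append(sum(combo))
--       signs.append(sign)
--
--   return coefficients, signs
-- ===== SOURCE B (Python) =====
-- def expandLog(lst: list):
--   """
--   Expand a product of binomials in terms of their log (see original docstring).
--
--   Right-fold DP: buckets[j] holds the sums of all j-element subsets of the
--   suffix processed so far, in the same lexicographic order that
--   itertools.combinations produces; one pass touches each subset sum O(1) times.
--   """
--   buckets = [[0]]
--   for x in reversed(lst):
--     new = [buckets[0]]
--     for j in range(1, len(buckets) + 1):
--       withx = [x + s for s in buckets[j - 1]]
--       without = buckets[j] if j < len(buckets) else []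
--       new.append(withx + without)
--     buckets = new
--   coefficients = [s for bucket in buckets for s in bucket]
--   signs = []
--   sign = 1
--   for bucket in buckets:
--     signs += [sign] * len(bucket)
--     sign = -sign
--   return coefficients, signs
-- ===== Notes on version B (the rewrite author's own statement) =====
-- stated objective: alternative
-- what changed: Replaces per-size itertools.combinations enumeration with re-summing of each subset by a single right-to-left DP fold that extends per-size bucket lists of running subset sums in the same lexicographic order.
import Mathlib
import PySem

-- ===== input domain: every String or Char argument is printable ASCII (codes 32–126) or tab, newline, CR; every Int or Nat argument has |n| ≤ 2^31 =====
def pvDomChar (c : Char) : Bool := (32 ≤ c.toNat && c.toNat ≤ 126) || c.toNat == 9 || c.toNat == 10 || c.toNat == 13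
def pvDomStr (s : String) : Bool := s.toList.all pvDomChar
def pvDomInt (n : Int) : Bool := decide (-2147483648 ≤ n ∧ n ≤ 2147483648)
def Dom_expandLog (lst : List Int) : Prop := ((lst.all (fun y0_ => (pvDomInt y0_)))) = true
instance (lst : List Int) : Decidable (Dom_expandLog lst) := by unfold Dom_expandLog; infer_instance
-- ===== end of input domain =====

-- B replaces A's per-size combinations enumeration (which re-sums every subset) by one
-- right-to-left DP fold over per-size buckets of running subset sums, in the same order.

-- ===== PORT A =====
-- itertools.combinations(lst, k): k-element combinations in lexicographic index order
def combosA : List Int → Nat → List (List Int)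
  | _, 0 => [[]]
  | [], _ + 1 => []
  | x :: rest, k + 1 => (combosA rest k).map (x :: ·) ++ combosA rest (k + 1)

def expandLog (lst : List Int) : List Int × List Int :=
  let n : Int := lst.length
  let st :=
    (PySem.List.pyRange 1 (n + 1) 1).foldl
      (fun (st : List Int × List Int × Int) k =>
        let sign := st.2.2 * (-1)
        let st' :=
          (combosA lst k.toNat).foldl
            (fun (p : List Int × List Int) combo => (p.1 ++ [combo.sum], p.2 ++ [sign]))
            (st.1, st.2.1)
        (st'.1, st'.2, sign))
      ([0], [1], 1)
  (st.1, st.2.1)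

-- ===== PORT B =====
-- inner 'for j in range(1, len(buckets)+1)': new[j] = map (x+·) buckets[j-1] ++ buckets[j]
def stepAuxB (x : Int) : List (List Int) → List (List Int)
  | [] => []
  | [b] => [b.map (x + ·)]
  | b :: b' :: rest => (b.map (x + ·) ++ b') :: stepAuxB x (b' :: rest)

def stepB (x : Int) (buckets : List (List Int)) : List (List Int) :=
  buckets.headD [] :: stepAuxB x buckets

def signsOfB : List (List Int) → Int → List Int
  | [], _ => []
  | b :: rest, s => List.replicate b.length s ++ signsOfB rest (-s)

def expandLog_alt (lst : List Int) : List Int × List Int :=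
  let buckets := lst.foldr stepB [[0]]
  (buckets.flatten, signsOfB buckets 1)

-- ===== PRECONDITION & SPEC =====
def Spec_expandLog (lst : List Int) (out : List Int × List Int) : Prop := out = expandLog_alt lst
instance (lst : List Int) (out : List Int × List Int) : Decidable (Spec_expandLog lst out) := by unfold Spec_expandLog; infer_instance

-- ===== CLAIM (what is proved, stated in full; the proofs are below) =====
def Claim_equal_expandLog : Prop := ∀ (lst : List Int), Dom_expandLog lst → Spec_expandLog lst (expandLog lst)

-- ===== LEMMAS AND PROOFS =====

theorem combosA_of_len_lt (xs : List Int) (j : Nat) (h : xs.length < j) :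
    combosA xs j = [] := by
  induction xs generalizing j with
  | nil => cases j with
    | zero => omega
    | succ j => rfl
  | cons x rest ih =>
    cases j with
    | zero => omega
    | succ j =>
      simp only [combosA]
      have h1 : rest.length < j := by simp at h; omega
      rw [ih j h1, ih (j+1) (by omega)]
      simp

-- the bucket list after the fold: bucket j = sums of the j-subsets in combinations order
def gB (xs : List Int) (j : Nat) : List Int := (combosA xs j).map List.sum

theorem map_range_succ {α : Type} (g : Nat → α) (m : Nat) :
    (List.range (m + 1)).map g = g 0 :: (List.range m).map (fun j => g (j + 1)) := by
  rw [List.range_succ_eq_map, List.map_cons, List.map_map]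
  rfl

theorem stepAuxB_cons (x : Int) (b : List Int) (bs : List (List Int)) :
    stepAuxB x (b :: bs) = (b.map (x + ·) ++ bs.headD []) :: stepAuxB x bs := by
  cases bs <;> simp [stepAuxB]

theorem stepAuxB_spec (x : Int) (g : Nat → List Int) :
    ∀ (m : Nat), g (m + 1) = [] →
      stepAuxB x ((List.range (m + 1)).map g)
        = (List.range (m + 1)).map (fun j => (g j).map (x + ·) ++ g (j + 1)) := by
  intro m
  induction m generalizing g with
  | zero =>
    intro hg
    simp [stepAuxB, hg]
  | succ m ih =>
    intro hg
    rw [map_range_succ g (m + 1), stepAuxB_cons,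
        map_range_succ (fun j => (g j).map (x + ·) ++ g (j + 1)) (m + 1)]
    have hhead : ((List.range (m + 1)).map (fun j => g (j + 1))).headD [] = g 1 := by
      rw [map_range_succ (fun j => g (j + 1)) m]
      simp
    rw [hhead]
    rw [ih (fun j => g (j + 1)) hg]

theorem gB_zero (xs : List Int) : gB xs 0 = [0] := by
  cases xs <;> simp [gB, combosA]

theorem gB_cons_succ (x : Int) (rest : List Int) (j : Nat) :
    gB (x :: rest) (j + 1) = (gB rest j).map (x + ·) ++ gB rest (j + 1) := by
  simp only [gB, combosA, List.map_append, List.map_map]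
  congr 1

theorem foldr_stepB_spec (lst : List Int) :
    lst.foldr stepB [[0]] = (List.range (lst.length + 1)).map (gB lst) := by
  induction lst with
  | nil => simp [gB, combosA]
  | cons x rest ih =>
    simp only [List.foldr_cons, ih]
    have hlen : gB rest (rest.length + 1) = [] := by
      simp [gB, combosA_of_len_lt rest (rest.length + 1) (by omega)]
    rw [stepB]
    have h0 : ((List.range (rest.length + 1)).map (gB rest)).headD [] = gB rest 0 := by
      rw [map_range_succ]; simp
    rw [h0, stepAuxB_spec x (gB rest) rest.length hlen]
    have hR : (x :: rest).length + 1 = rest.length + 1 + 1 := by simp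
    rw [hR, map_range_succ (gB (x :: rest)) (rest.length + 1)]
    rw [gB_zero rest, gB_zero (x :: rest)]
    congr 1
    apply List.map_congr_left
    intro j _
    rw [gB_cons_succ]

-- A's inner loop: appending combo.sum / sign one at a time
theorem foldl_append_one {α : Type} (f : α → Int) (s0 : Int) :
    ∀ (l : List α) (c s : List Int),
      l.foldl (fun (p : List Int × List Int) combo => (p.1 ++ [f combo], p.2 ++ [s0])) (c, s)
        = (c ++ l.map f, s ++ List.replicate l.length s0) := by
  intro l
  induction l with
  | nil => intro c s; simp
  | cons a t ih =>
    intro c s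
    simp only [List.foldl_cons, ih, List.map_cons, List.length_cons]
    simp [List.replicate_succ]

-- sign bookkeeping of A's outer loop, expressed over the (Int) list of k's
def sigFlatA (lst : List Int) : List Int → Int → List Int
  | [], _ => []
  | k :: ks, sg => List.replicate (combosA lst k.toNat).length (-sg) ++ sigFlatA lst ks (-sg)

theorem A_outer_spec (lst : List Int) :
    ∀ (ks : List Int) (c s : List Int) (sg : Int),
      ks.foldl
        (fun (st : List Int × List Int × Int) k =>
          let sign := st.2.2 * (-1)
          let st' :=
            (combosA lst k.toNat).foldl
              (fun (p : List Int × List Int) combo => (p.1 ++ [combo.sum], p.2 ++ [sign]))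
              (st.1, st.2.1)
          (st'.1, st'.2, sign))
        (c, s, sg)
      = (c ++ (ks.map (fun k => (combosA lst k.toNat).map List.sum)).flatten,
         s ++ sigFlatA lst ks sg,
         sg * (-1) ^ ks.length) := by
  intro ks
  induction ks with
  | nil => intro c s sg; simp [sigFlatA]
  | cons k t ih =>
    intro c s sg
    simp only [List.foldl_cons]
    rw [foldl_append_one List.sum (sg * (-1)) (combosA lst k.toNat) c s]
    rw [ih]
    simp only [List.map_cons, List.flatten_cons, List.length_cons, sigFlatA, Prod.mk.injEq]
    have hsg : sg * (-1) = -sg := by ring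
    refine ⟨by simp, by rw [hsg]; simp, by ring⟩

theorem sigFlatA_eq_signsOfB (lst : List Int) :
    ∀ (ks : List Int) (sg : Int),
      sigFlatA lst ks sg
        = signsOfB (ks.map (fun k => (combosA lst k.toNat).map List.sum)) (-sg) := by
  intro ks
  induction ks with
  | nil => intro sg; simp [sigFlatA, signsOfB]
  | cons k t ih =>
    intro sg
    simp only [sigFlatA, List.map_cons, signsOfB, List.length_map]
    rw [ih (-sg)]

theorem map_pyRange_toNat (f : Nat → List Int) (n : Nat) :
    (PySem.List.pyRange 1 ((n : Int) + 1) 1).map (fun k => f k.toNat)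
      = (List.range n).map (fun j => f (j + 1)) := by
  rw [PySem.List.pyRange_one]
  have h : ((n : Int) + 1 - 1).toNat = n := by omega
  rw [h, List.map_map]
  apply List.map_congr_left
  intro j _
  simp only [Function.comp]
  congr 1
  omega

-- ===== VERDICT (by name: the statement is the Claim_ definition above) =====
theorem expandLog_spec : Claim_equal_expandLog := by
  intro lst _
  show expandLog lst = expandLog_alt lst
  simp only [expandLog, expandLog_alt]
  rw [foldr_stepB_spec lst]
  rw [A_outer_spec lst (PySem.List.pyRange 1 ((lst.length : Int) + 1) 1) [0] [1] 1]
  rw [sigFlatA_eq_signsOfB lst]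
  rw [map_pyRange_toNat (fun m => (combosA lst m).map List.sum) lst.length]
  rw [map_range_succ (gB lst) lst.length]
  simp only [gB_zero, List.flatten_cons, Prod.mk.injEq, signsOfB, List.length_singleton,
    List.replicate_one]
  exact ⟨by simp [gB], by simp [gB]⟩
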